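-- pv_equiv track=rewrite | github.com/Alberto27-git/esquema_comunicacion | main.py | contar_frecuencia
-- ===== SOURCE A (Python) =====
-- def contar_frecuencia(paquete_bytes):
--     frecuencia = {}
--     for simbolo in paquete_bytes:
--         if simbolo in frecuencia:
--             frecuencia[simbolo] += 1
--         else:
--             frecuencia[simbolo] = 1
--
--     return frecuencia
-- ===== SOURCE B (Python) =====
-- def contar_frecuencia(paquete_bytes):
--     simbolos = list(paquete_bytes)
--     return {s: simbolos.count(s) for s in dict.fromkeys(simbolos)}
-- ===== Notes on version B (the rewrite author's own statement) =====
-- stated objective: idiomatic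
-- what changed: B replaces A's single accumulating dict pass with a build-the-distinct-key-list-then-count shape: it deduplicates the symbols once and builds the result by counting each distinct symbol across the whole sequence with list.count.
import Mathlib
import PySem

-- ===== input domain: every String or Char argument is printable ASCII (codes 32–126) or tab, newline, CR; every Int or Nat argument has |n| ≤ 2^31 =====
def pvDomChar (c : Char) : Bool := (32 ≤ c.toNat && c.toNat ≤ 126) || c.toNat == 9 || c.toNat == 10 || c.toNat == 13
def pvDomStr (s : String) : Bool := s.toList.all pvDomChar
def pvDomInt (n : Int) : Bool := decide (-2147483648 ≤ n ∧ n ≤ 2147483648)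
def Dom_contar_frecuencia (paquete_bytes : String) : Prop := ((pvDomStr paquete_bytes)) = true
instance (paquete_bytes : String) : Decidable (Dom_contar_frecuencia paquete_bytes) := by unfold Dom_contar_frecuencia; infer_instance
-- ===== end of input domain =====

-- B replaces A's accumulating dict pass with an ordered-dedup-then-count-each-key shape (idiomatic, structurally different).
-- ===== PORT A =====
def contar_frecuencia (paquete_bytes : String) : List (String × Int) :=
  ((paquete_bytes.toList.map (fun c => String.mk [c])).foldl
      (fun d simbolo =>
        if d.contains simbolo then d.modify simbolo 0 (· + 1)
        else d.insert simbolo 1)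
      PySem.Dict.empty).items

-- ===== PORT B =====
def contar_frecuencia_alt (paquete_bytes : String) : List (String × Int) :=
  let simbolos := paquete_bytes.toList.map (fun c => String.mk [c])
  (PySem.List.dedup simbolos).map (fun s => (s, (PySem.List.count simbolos s : Int)))

-- ===== PRECONDITION & SPEC =====
def Spec_contar_frecuencia (paquete_bytes : String) (out : List (String × Int)) : Prop := out = contar_frecuencia_alt paquete_bytes
instance (paquete_bytes : String) (out : List (String × Int)) : Decidable (Spec_contar_frecuencia paquete_bytes out) := by unfold Spec_contar_frecuencia; infer_instance

-- ===== CLAIM (what is proved, stated in full; the proofs are below) =====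
def Claim_equal_contar_frecuencia : Prop := ∀ (paquete_bytes : String), Dom_contar_frecuencia paquete_bytes → Spec_contar_frecuencia paquete_bytes (contar_frecuencia paquete_bytes)

-- ===== LEMMAS AND PROOFS =====

-- A's branch 'if present: d[x] += 1 else d[x] = 1' is exactly d.modify x 0 (+1)
theorem pv_step_eq_modify {κ : Type} [BEq κ] [LawfulBEq κ] (d : PySem.Dict κ Int) (x : κ) :
    (if d.contains x then d.modify x 0 (· + 1) else d.insert x 1) = d.modify x 0 (· + 1) := by
  by_cases h : d.contains x = true
  · simp [h]
  · have h0 : d.getD x 0 = 0 := PySem.Dict.getD_of_not_contains d 0 (by simpa using h)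
    simp [h, PySem.Dict.modify, h0]

-- ===== VERDICT (by name: the statement is the Claim_ definition above) =====
theorem contar_frecuencia_spec : Claim_equal_contar_frecuencia := by
  intro s _
  unfold Spec_contar_frecuencia contar_frecuencia contar_frecuencia_alt
  have hstep : ∀ (d : PySem.Dict String Int) (x : String),
      (if d.contains x then d.modify x 0 (· + 1) else d.insert x 1) = d.modify x 0 (· + 1) :=
    fun d x => pv_step_eq_modify d x
  rw [show (fun (d : PySem.Dict String Int) simbolo =>
        if d.contains simbolo then d.modify simbolo 0 (· + 1) else d.insert simbolo 1)
      = (fun d x => d.modify x 0 (· + 1)) from funext fun d => funext fun x => hstep d x]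
  rw [← PySem.Dict.counter_eq_foldl, PySem.Dict.items_counter]
  simp [PySem.List.dedup_eq_ofList, PySem.List.count_eq]
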